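-- pv_equiv track=rewrite | github.com/raunak-garhwal/Network_Pharmacology_Work | step-two_v2.py | validate_smiles
-- ===== SOURCE A (Python) =====
-- def validate_smiles(smiles: str) -> bool:
--     """Validate SMILES string"""
--     if not smiles or not isinstance(smiles, str):
--         return False
--
--     smiles = smiles.strip()
--
--     # Basic validation checks
--     if len(smiles) < 3:
--         return False
--
--     # Check for common SMILES characters
--     valid_chars = set('abcdefghijklmnopqrstuvwxyzABCDEFGHIJKLMNOPQRSTUVWXYZ0123456789()[]@+-=#/\\.')
--     if not all(c in valid_chars for c in smiles):
--         return False
--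
--     # Check balanced parentheses and brackets
--     parens = smiles.count('(') - smiles.count(')')
--     brackets = smiles.count('[') - smiles.count(']')
--
--     if parens != 0 or brackets != 0:
--         return False
--
--     return True
-- ===== SOURCE B (Python) =====
-- def validate_smiles(smiles: str) -> bool:
--     """Validate SMILES string (single-pass re-implementation)"""
--     if not smiles or not isinstance(smiles, str):
--         return False
--
--     smiles = smiles.strip()
--
--     if len(smiles) < 3:
--         return False
--
--     valid_chars = 'abcdefghijklmnopqrstuvwxyzABCDEFGHIJKLMNOPQRSTUVWXYZ0123456789()[]@+-=#/\\.'
--     paren_balance = 0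
--     bracket_balance = 0
--     for c in smiles:
--         if c not in valid_chars:
--             return False
--         if c == '(':
--             paren_balance += 1
--         elif c == ')':
--             paren_balance -= 1
--         elif c == '[':
--             bracket_balance += 1
--         elif c == ']':
--             bracket_balance -= 1
--
--     return paren_balance == 0 and bracket_balance == 0
-- ===== Notes on version B (the rewrite author's own statement) =====
-- stated objective: alternative
-- what changed: Replaced the separate all(...) membership scan plus four .count() scans with one single loop that checks membership and maintains two signed balance counters.
import Mathlib
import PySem

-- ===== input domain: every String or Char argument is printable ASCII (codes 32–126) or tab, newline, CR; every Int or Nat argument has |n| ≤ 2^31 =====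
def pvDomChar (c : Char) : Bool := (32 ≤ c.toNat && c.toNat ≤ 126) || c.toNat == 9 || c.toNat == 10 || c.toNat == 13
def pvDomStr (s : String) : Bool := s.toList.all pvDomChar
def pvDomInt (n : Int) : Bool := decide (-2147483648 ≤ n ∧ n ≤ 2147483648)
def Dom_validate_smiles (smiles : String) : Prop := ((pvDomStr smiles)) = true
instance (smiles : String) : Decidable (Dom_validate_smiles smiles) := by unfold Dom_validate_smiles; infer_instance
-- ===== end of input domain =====

-- B merges A's five scans (the all(...) membership pass and four .count() passes) into one
-- single loop maintaining two signed balance counters; same return value everywhere.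

-- ===== PORT A =====
def pvValidChars : List Char :=
  "abcdefghijklmnopqrstuvwxyzABCDEFGHIJKLMNOPQRSTUVWXYZ0123456789()[]@+-=#/\\.".toList

def validate_smiles (smiles : String) : Bool :=
  -- 'not smiles' is true exactly for the empty string; isinstance is always true here
  if smiles.toList.isEmpty then false
  else
    let s := PySem.Chars.strip smiles.toList
    if s.length < 3 then false
    else if !(s.all (fun c => decide (c ∈ PySem.Set.ofList pvValidChars))) then false
    else
      let parens : Int := (PySem.Chars.count s ['('] : Int) - (PySem.Chars.count s [')'] : Int)
      let brackets : Int := (PySem.Chars.count s ['['] : Int) - (PySem.Chars.count s [']'] : Int)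
      if parens ≠ 0 ∨ brackets ≠ 0 then false else true

-- ===== PORT B =====
-- 'c not in valid_chars' tests a ONE-character substring, which for single chars is exactly
-- list membership of the character; ported as List.contains (exact on this use).
def pvAltLoop : List Char → Int → Int → Bool
  | [], p, b => p == 0 && b == 0
  | c :: cs, p, b =>
    if !(pvValidChars.contains c) then false
    else if c == '(' then pvAltLoop cs (p + 1) b
    else if c == ')' then pvAltLoop cs (p - 1) b
    else if c == '[' then pvAltLoop cs p (b + 1)
    else if c == ']' then pvAltLoop cs p (b - 1)
    else pvAltLoop cs p b

def validate_smiles_alt (smiles : String) : Bool :=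
  if smiles.toList.isEmpty then false
  else
    let s := PySem.Chars.strip smiles.toList
    if s.length < 3 then false
    else pvAltLoop s 0 0

-- ===== PRECONDITION & SPEC =====
def Spec_validate_smiles (smiles : String) (out : Bool) : Prop := out = validate_smiles_alt smiles
instance (smiles : String) (out : Bool) : Decidable (Spec_validate_smiles smiles out) := by unfold Spec_validate_smiles; infer_instance

-- ===== CLAIM (what is proved, stated in full; the proofs are below) =====
def Claim_equal_validate_smiles : Prop := ∀ (smiles : String), Dom_validate_smiles smiles → Spec_validate_smiles smiles (validate_smiles smiles)

-- ===== LEMMAS AND PROOFS =====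

-- Python str.count of a single-character pattern is the character count.
theorem pvCount_go_singleton (c : Char) :
    ∀ (l : List Char) (fuel acc : Nat), l.length ≤ fuel →
      PySem.Chars.count.go [c] fuel l acc = acc + l.count c := by
  intro l
  induction l with
  | nil =>
      intro fuel acc _
      cases fuel <;> simp [PySem.Chars.count.go]
  | cons x xs ih =>
      intro fuel acc h
      cases fuel with
      | zero => simp at h
      | succ n =>
        by_cases hx : x = c
        · subst hx
          have hp : [x].isPrefixOf (x :: xs) = true := by simp [List.isPrefixOf]
          simp [PySem.Chars.count.go, hp, ih n (acc + 1) (by simpa using h)]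
          omega
        · have hp : [c].isPrefixOf (x :: xs) = false := by
            simp [List.isPrefixOf]; exact fun hcx => (hx hcx.symm).elim
          simp [PySem.Chars.count.go, hp, ih n acc (by simpa using h), hx]

theorem pvCount_singleton (s : List Char) (c : Char) :
    PySem.Chars.count s [c] = s.count c := by
  simp [PySem.Chars.count, pvCount_go_singleton c s s.length 0 le_rfl]

-- characterisation of B's single-pass loop
theorem pvAltLoop_iff (cs : List Char) : ∀ (p b : Int),
    pvAltLoop cs p b = true ↔
      ((∀ c ∈ cs, c ∈ pvValidChars) ∧
       p + (cs.count '(' : Int) - (cs.count ')' : Int) = 0 ∧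
       b + (cs.count '[' : Int) - (cs.count ']' : Int) = 0) := by
  induction cs with
  | nil => intro p b; simp [pvAltLoop]
  | cons c cs ih =>
      intro p b
      by_cases hv : c ∈ pvValidChars
      · have hv' : pvValidChars.contains c = true := by simpa using hv
        by_cases h1 : c = '('
        · subst h1; simp [pvAltLoop, hv, ih]; intros; omega
        · by_cases h2 : c = ')'
          · subst h2; simp [pvAltLoop, hv, ih]; intros; omega
          · by_cases h3 : c = '['
            · subst h3; simp [pvAltLoop, hv, ih]; intros; omega
            · by_cases h4 : c = ']'
              · subst h4; simp [pvAltLoop, hv, ih]; intros; omega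
              · simp [pvAltLoop, hv, h1, h2, h3, h4, ih]
      · have hv' : pvValidChars.contains c = false := by simpa using hv
        simp [pvAltLoop, hv]

-- ===== VERDICT (by name: the statement is the Claim_ definition above) =====
theorem validate_smiles_spec : Claim_equal_validate_smiles := by
  intro smiles _
  unfold Spec_validate_smiles validate_smiles validate_smiles_alt
  by_cases h0 : smiles.toList.isEmpty
  · simp [h0]
  · simp only [h0, Bool.false_eq_true, if_false]
    set s := PySem.Chars.strip smiles.toList with hs
    by_cases h3 : s.length < 3
    · simp [h3]
    · simp only [h3, if_false]
      rw [Bool.eq_iff_iff, pvAltLoop_iff]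
      by_cases hall : ∀ c ∈ s, c ∈ pvValidChars
      · have hall' : (s.all (fun c => decide (c ∈ PySem.Set.ofList pvValidChars))) = true := by
          simp only [List.all_eq_true, decide_eq_true_eq, PySem.Set.mem_ofList]
          exact hall
        simp only [hall', Bool.not_true, Bool.false_eq_true, if_false, pvCount_singleton]
        constructor
        · intro h
          split_ifs at h with hc
          rw [not_or, not_not, not_not] at hc
          exact ⟨hall, by omega, by omega⟩
        · rintro ⟨-, h1, h2⟩
          have hc : ¬ (((s.count '(' : Int) - (s.count ')' : Int)) ≠ 0 ∨
                    ((s.count '[' : Int) - (s.count ']' : Int)) ≠ 0) := by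
            rw [not_or, not_not, not_not]; exact ⟨by omega, by omega⟩
          simp only [hc, if_false]
      · have hall' : (s.all (fun c => decide (c ∈ PySem.Set.ofList pvValidChars))) = false := by
          simp only [List.all_eq_false]
          rcases not_forall.mp hall with ⟨c, hc⟩
          obtain ⟨hmem, hnc⟩ := Classical.not_imp.mp hc
          exact ⟨c, hmem, by simp [PySem.Set.mem_ofList, hnc]⟩
        simp only [hall', Bool.not_false, if_true, Bool.false_eq_true, false_iff]
        rintro ⟨h, -⟩
        exact hall h
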